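-- pv_equiv track=rewrite | github.com/aviswerdlow/k4 | 03_SOLVERS/zone_mask_v1/scripts/mask_library.py | apply
-- ===== SOURCE A (Python) =====
-- from typing import List, Dict, Any, Tuple
--
-- def apply(text: str, params: Dict[str, Any]) -> str:
--     cycle_length = params.get('cycle', 3)
--     result = list(text)
--     n = len(text)
--
--     # Apply cycles
--     for start in range(0, n - cycle_length + 1, cycle_length):
--         # Rotate positions within cycle
--         temp = result[start]
--         for i in range(cycle_length - 1):
--             result[start + i] = result[start + i + 1]
--         result[start + cycle_length - 1] = temp
--
--     return ''.join(result)
-- ===== SOURCE B (Python) =====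
-- def apply(text, params):
--     cycle_length = params.get('cycle', 3)
--     chunks = [text[i:i + cycle_length] for i in range(0, len(text), cycle_length)]
--     return ''.join(ch[1:] + ch[0] if len(ch) == cycle_length else ch for ch in chunks)
-- ===== Notes on version B (the rewrite author's own statement) =====
-- stated objective: alternative
-- what changed: A rotates each block in place with nested shift loops over a mutable char list; B slices the text into fixed-size chunks and rotates each full chunk by slicing (ch[1:]+ch[0]), joining the results. Pre_ excludes cycle <= 0: at 0 both raise ValueError, and for negative cycle A's unchanged result is an accident of an empty range while B returns an empty join.
-- outside the precondition, e.g. on apply('ABCD', {'cycle': -2}): A returns 'ABCD', B returns ''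
import Mathlib
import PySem

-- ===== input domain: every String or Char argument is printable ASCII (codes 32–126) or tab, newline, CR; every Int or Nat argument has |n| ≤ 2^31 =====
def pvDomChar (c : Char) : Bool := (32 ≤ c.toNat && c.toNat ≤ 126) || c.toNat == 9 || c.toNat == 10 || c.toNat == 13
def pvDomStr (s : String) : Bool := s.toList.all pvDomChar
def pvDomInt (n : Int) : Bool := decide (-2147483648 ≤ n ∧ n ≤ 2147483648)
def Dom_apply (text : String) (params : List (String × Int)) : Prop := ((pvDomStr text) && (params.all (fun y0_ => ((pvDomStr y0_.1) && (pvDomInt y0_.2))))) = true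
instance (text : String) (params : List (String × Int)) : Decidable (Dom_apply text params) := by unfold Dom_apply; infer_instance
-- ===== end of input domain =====

-- B replaces A's stateful in-place block-rotation loops by slicing the text into fixed-size
-- chunks and rotating each full chunk with slice concatenation (objective: alternative).

-- ===== PORT A =====
-- loop body of A's outer 'for start in range(0, n - cycle_length + 1, cycle_length)'
def blockStep (cycle : Int) (res : List Char) (start : Int) : List Char :=
  let temp := PySem.List.pyGetD res start ' '
  let res2 := (PySem.List.pyRange 0 (cycle - 1) 1).foldl
      (fun r i => PySem.List.pySetD r (start + i) (PySem.List.pyGetD r (start + i + 1) ' ')) res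
  PySem.List.pySetD res2 (start + cycle - 1) temp

def apply (text : String) (params : List (String × Int)) : String :=
  let cycle := (List.lookup "cycle" params).getD 3
  let n : Int := PySem.Str.len text
  String.ofList ((PySem.List.pyRange 0 (n - cycle + 1) cycle).foldl (blockStep cycle) text.toList)

-- ===== PORT B =====
-- 'ch[1:] + ch[0] if len(ch) == cycle_length else ch'
-- (ch[0] is ported as pyGetD ch 0 ' ': it is only reached when ch.length = cycle ≥ 1 inside Pre_, where it is exact)
def rotChunk (cycle : Int) (ch : List Char) : List Char :=
  if (ch.length : Int) = cycle then PySem.List.slice ch (some 1) none ++ [PySem.List.pyGetD ch 0 ' ']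
  else ch

def apply_alt (text : String) (params : List (String × Int)) : String :=
  let cycle := (List.lookup "cycle" params).getD 3
  let ts := text.toList
  let chunks := (PySem.List.pyRange 0 (PySem.Str.len text) cycle).map
      (fun i => PySem.List.slice ts (some i) (some (i + cycle)))
  String.ofList (chunks.map (rotChunk cycle)).flatten

-- ===== PRECONDITION & SPEC =====
-- Pre_ excludes cycle ≤ 0: at cycle = 0 both Pythons raise ValueError (range step 0); for
-- negative cycle A's unchanged result is an accident of an empty range() (outside the task's
-- natural domain of positive block sizes), where B returns an empty join.
def Pre_apply (text : String) (params : List (String × Int)) : Prop :=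
  1 ≤ (List.lookup "cycle" params).getD 3
instance (text : String) (params : List (String × Int)) : Decidable (Pre_apply text params) := by
  unfold Pre_apply; infer_instance

def pvWitness_apply : String × (List (String × Int)) := ("ABCDEFG", [("cycle", 3)])

def Spec_apply (text : String) (params : List (String × Int)) (out : String) : Prop := out = apply_alt text params
instance (text : String) (params : List (String × Int)) (out : String) : Decidable (Spec_apply text params out) := by unfold Spec_apply; infer_instance

-- ===== CLAIM (what is proved, stated in full; the proofs are below) =====
def Claim_equal_apply : Prop := ∀ (text : String) (params : List (String × Int)), Dom_apply text params → Pre_apply text params → Spec_apply text params (apply text params)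

-- ===== LEMMAS AND PROOFS =====

-- the common per-position model both proofs meet at
def srcChar (ts : List Char) (c j : Nat) : Char :=
  if (j + 1) % c = 0 then ts.getD (j + 1 - c) ' ' else ts.getD (j + 1) ' '

theorem outerRange (n c : Nat) (hc : 1 ≤ c) :
    PySem.List.pyRange 0 ((n : Int) - (c : Int) + 1) (c : Int)
      = (List.range (n / c)).map (fun k : Nat => ((c : Int) * (k : Int))) := by
  rw [PySem.List.pyRange_of_pos _ _ (by exact_mod_cast hc)]
  have hcount : (if (0:Int) < (n:Int) - c + 1 then (((n:Int) - c + 1 - 0 + c - 1) / c).toNat else 0) = n / c := by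
    by_cases h : (0:Int) < (n:Int) - c + 1
    · rw [if_pos h]
      have h1 : ((n:Int) - c + 1 - 0 + c - 1) = (n:Int) := by ring
      rw [h1]
      have h2 : (n:Int) / (c:Int) = ((n / c : Nat) : Int) := by rw [Int.natCast_div]
      rw [h2, Int.toNat_natCast]
    · rw [if_neg h]
      have : n / c = 0 := Nat.div_eq_of_lt (by omega)
      omega
  rw [hcount]
  exact List.map_congr_left (fun k _ => by ring)

theorem chunkRange (n c : Nat) (hc : 1 ≤ c) :
    PySem.List.pyRange 0 (n : Int) (c : Int)
      = (List.range ((n + c - 1) / c)).map (fun k : Nat => ((c * k : Nat) : Int)) := by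
  rw [PySem.List.pyRange_of_pos _ _ (by exact_mod_cast hc)]
  have hcount : (if (0:Int) < (n:Int) then (((n:Int) - 0 + c - 1) / c).toNat else 0) = (n + c - 1) / c := by
    by_cases h : (0:Int) < (n:Int)
    · rw [if_pos h]
      have h1 : ((n:Int) - 0 + c - 1) = ((n + c - 1 : Nat) : Int) := by omega
      rw [h1, ← Int.natCast_div, Int.toNat_natCast]
    · rw [if_neg h]
      have hn : n = 0 := by omega
      rw [hn, Nat.div_eq_of_lt (by omega)]
  rw [hcount]
  exact List.map_congr_left (fun k _ => by push_cast; ring)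

theorem innerShift (res : List Char) (s m : Nat) (hm : s + m < res.length) :
    (((PySem.List.pyRange 0 (m : Int) 1).foldl
      (fun r i => PySem.List.pySetD r ((s : Int) + i) (PySem.List.pyGetD r ((s : Int) + i + 1) ' ')) res).length = res.length) ∧
    (∀ j : Nat, ((PySem.List.pyRange 0 (m : Int) 1).foldl
      (fun r i => PySem.List.pySetD r ((s : Int) + i) (PySem.List.pyGetD r ((s : Int) + i + 1) ' ')) res).getD j ' '
      = if s ≤ j ∧ j < s + m then res.getD (j + 1) ' ' else res.getD j ' ') := by
  induction m with
  | zero =>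
    rw [PySem.List.pyRange_one_eq_nil (by simp)]
    constructor
    · rfl
    · intro j; rw [if_neg (by omega)]; rfl
  | succ m ih =>
    have ih' := ih (by omega)
    have hcast : ((m + 1 : Nat) : Int) = (m : Int) + 1 := by push_cast; ring
    rw [hcast, PySem.List.pyRange_one_succ_right (by positivity), List.foldl_append]
    set F := (PySem.List.pyRange 0 (m : Int) 1).foldl
      (fun r i => PySem.List.pySetD r ((s : Int) + i) (PySem.List.pyGetD r ((s : Int) + i + 1) ' ')) res with hF
    simp only [List.foldl_cons, List.foldl_nil]
    have hlen : F.length = res.length := ih'.1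
    have hread : PySem.List.pyGetD F ((s : Int) + (m : Int) + 1) ' ' = res.getD (s + m + 1) ' ' := by
      have h1 : ((s : Int) + (m : Int) + 1) = ((s + m + 1 : Nat) : Int) := by push_cast; ring
      rw [h1, PySem.List.pyGetD_natCast, ih'.2 (s + m + 1), if_neg (by omega)]
    have hsm : ((s : Int) + (m : Int)) = ((s + m : Nat) : Int) := by push_cast; ring
    constructor
    · rw [PySem.List.length_pySetD, hlen]
    · intro j
      rw [hread, hsm, ← PySem.List.pyGetD_natCast,
        PySem.List.pyGetD_pySetD_natCast F (s + m) j _ ' ' (by rw [hlen]; omega),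
        PySem.List.pyGetD_natCast]
      by_cases hj : j = s + m
      · rw [if_pos hj, if_pos (by omega), hj]
      · rw [if_neg hj, ih'.2 j]
        by_cases h2 : s ≤ j ∧ j < s + m
        · rw [if_pos h2, if_pos (by omega)]
        · rw [if_neg h2, if_neg (by omega)]

theorem blockChar (c s : Nat) (hc : 1 ≤ c) (res : List Char) (hs : s + c ≤ res.length) :
    ((blockStep (c : Int) res (s : Int)).length = res.length) ∧
    (∀ j : Nat, (blockStep (c : Int) res (s : Int)).getD j ' '
      = if s ≤ j ∧ j < s + c - 1 then res.getD (j + 1) ' '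
        else if j = s + c - 1 then res.getD s ' '
        else res.getD j ' ') := by
  unfold blockStep
  have hc1 : ((c : Int) - 1) = ((c - 1 : Nat) : Int) := by omega
  rw [hc1]
  obtain ⟨hlen, hget⟩ := innerShift res s (c - 1) (by omega)
  set F := (PySem.List.pyRange 0 ((c - 1 : Nat) : Int) 1).foldl
      (fun r i => PySem.List.pySetD r ((s : Int) + i) (PySem.List.pyGetD r ((s : Int) + i + 1) ' ')) res with hF
  have hidx : ((s : Int) + (c : Int) - 1) = ((s + c - 1 : Nat) : Int) := by omega
  have htemp : PySem.List.pyGetD res (s : Int) ' ' = res.getD s ' ' := PySem.List.pyGetD_natCast res s ' '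
  constructor
  · simp only [hidx, PySem.List.length_pySetD, hlen]
  · intro j
    have := PySem.List.pyGetD_pySetD_natCast F (s + c - 1) j (PySem.List.pyGetD res (s : Int) ' ') ' ' (by rw [hlen]; omega)
    rw [hidx]
    show (PySem.List.pySetD F (((s + c - 1 : Nat)) : Int) (PySem.List.pyGetD res (s : Int) ' ')).getD j ' ' = _
    rw [← PySem.List.pyGetD_natCast (PySem.List.pySetD F _ _), this, htemp,
      PySem.List.pyGetD_natCast F, hget j]
    by_cases hj : j = s + c - 1
    · rw [if_pos hj, if_neg (by omega), if_pos hj]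
    · rw [if_neg hj]
      by_cases h2 : s ≤ j ∧ j < s + (c - 1)
      · rw [if_pos h2, if_pos (by omega)]
      · rw [if_neg h2, if_neg (by omega), if_neg hj]

theorem outerInv (c : Nat) (hc : 1 ≤ c) (ts : List Char) (k : Nat) (hk : k ≤ ts.length / c) :
    (((List.range k).foldl (fun res (b : Nat) => blockStep (c : Int) res ((c : Int) * (b : Int))) ts).length = ts.length) ∧
    (∀ j : Nat, ((List.range k).foldl (fun res (b : Nat) => blockStep (c : Int) res ((c : Int) * (b : Int))) ts).getD j ' '
      = if j < k * c then srcChar ts c j else ts.getD j ' ') := by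
  induction k with
  | zero =>
    refine ⟨by rw [List.range_zero, List.foldl_nil], fun j => ?_⟩
    rw [List.range_zero, List.foldl_nil, if_neg (by omega)]
  | succ k ih =>
    obtain ⟨hlen, hget⟩ := ih (by omega)
    set F := (List.range k).foldl (fun res (b : Nat) => blockStep (c : Int) res ((c : Int) * (b : Int))) ts with hF
    rw [List.range_succ, List.foldl_append, List.foldl_cons, List.foldl_nil]
    have hkc : (k + 1) * c ≤ ts.length := (Nat.le_div_iff_mul_le (by omega)).1 hk
    have hmul : (k + 1) * c = k * c + c := by ring
    have hcast : ((c : Int) * (k : Int)) = ((k * c : Nat) : Int) := by push_cast; ring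
    rw [hcast]
    obtain ⟨blen, bget⟩ := blockChar c (k * c) hc F (by rw [hlen]; omega)
    constructor
    · rw [blen, hlen]
    · intro j
      rw [bget j]
      by_cases h1 : k * c ≤ j ∧ j < k * c + c - 1
      · rw [if_pos h1, hget (j + 1), if_neg (by omega), if_pos (by omega)]
        have hmod : (j + 1) % c = j + 1 - k * c := by
          have h' : (c * k + (j + 1 - k * c)) % c = (j + 1 - k * c) % c := Nat.mul_add_mod c k _
          have he : c * k + (j + 1 - k * c) = j + 1 := by rw [Nat.mul_comm]; omega
          rw [he] at h'
          rw [h', Nat.mod_eq_of_lt (show j + 1 - k * c < c by omega)]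
        have hne : (j + 1) % c ≠ 0 := by rw [hmod]; omega
        simp only [srcChar]
        rw [if_neg hne]
      · rw [if_neg h1]
        by_cases h2 : j = k * c + c - 1
        · rw [if_pos h2, hget (k * c), if_neg (by omega), if_pos (by omega)]
          have hmod : (j + 1) % c = 0 := by
            have : j + 1 = (k + 1) * c := by omega
            rw [this, Nat.mul_mod_left]
          simp only [srcChar]
          rw [if_pos hmod]
          congr 1
          omega
        · rw [if_neg h2, hget j]
          by_cases h3 : j < k * c
          · rw [if_pos h3, if_pos (by omega)]
          · rw [if_neg h3, if_neg (by omega)]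

-- B-side: a full chunk rotates to (drop 1) ++ [first]
theorem rotChunk_full (c : Nat) (ch : List Char) (h : ch.length = c) :
    rotChunk (c : Int) ch = ch.drop 1 ++ [ch.getD 0 ' '] := by
  unfold rotChunk
  rw [if_pos (by exact_mod_cast congrArg (Nat.cast : Nat → Int) h)]
  rw [PySem.List.slice_from_one, List.drop_one]
  have h0 : (0 : Int) = ((0 : Nat) : Int) := rfl
  rw [h0, PySem.List.pyGetD_natCast]

theorem chunk_getD (ts : List Char) (s c r : Nat) (hr : r < c) (hlt : s + r < ts.length) :
    ((ts.drop s).take c).getD r ' ' = ts.getD (s + r) ' ' := by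
  have h1 : r < ((ts.drop s).take c).length := by
    simp only [List.length_take, List.length_drop]; omega
  rw [List.getD_eq_getElem _ _ h1, List.getElem_take, List.getElem_drop,
    List.getD_eq_getElem _ _ (by omega)]

-- the join of the first k rotated full chunks, pointwise
theorem joinChar (c : Nat) (hc : 1 ≤ c) (ts : List Char) (k : Nat) (hk : k ≤ ts.length / c) :
    (((List.range k).map (fun b => rotChunk (c : Int) ((ts.drop (c * b)).take c))).flatten.length = k * c) ∧
    (∀ j : Nat, j < k * c →
      ((List.range k).map (fun b => rotChunk (c : Int) ((ts.drop (c * b)).take c))).flatten.getD j ' '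
        = srcChar ts c j) := by
  induction k with
  | zero => exact ⟨by simp, fun j hj => by omega⟩
  | succ k ih =>
    obtain ⟨hlen, hget⟩ := ih (by omega)
    have hkc : (k + 1) * c ≤ ts.length := (Nat.le_div_iff_mul_le (by omega)).1 hk
    have hmul : (k + 1) * c = k * c + c := by ring
    have hck : c * k = k * c := Nat.mul_comm c k
    set J := ((List.range k).map (fun b => rotChunk (c : Int) ((ts.drop (c * b)).take c))).flatten with hJ
    set ch := (ts.drop (c * k)).take c with hch
    have hchlen : ch.length = c := by
      rw [hch]; simp only [List.length_take, List.length_drop]; omega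
    have hrot : rotChunk (c : Int) ch = ch.drop 1 ++ [ch.getD 0 ' '] := rotChunk_full c ch hchlen
    rw [List.range_succ, List.map_append, List.flatten_append]
    simp only [List.map_cons, List.map_nil, List.flatten_cons, List.flatten_nil, List.append_nil]
    rw [← hch, hrot]
    have hrotlen : (ch.drop 1 ++ [ch.getD 0 ' ']).length = c := by
      simp only [List.length_append, List.length_drop, List.length_cons, List.length_nil, hchlen]
      omega
    constructor
    · rw [List.length_append, hlen, hrotlen]; ring
    · intro j hj
      by_cases h1 : j < k * c
      · rw [List.getD_append _ _ _ _ (by rw [hlen]; exact h1)]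
        exact hget j h1
      · rw [List.getD_append_right _ _ _ _ (by rw [hlen]; omega)]
        rw [hlen]
        set r := j - k * c with hr
        have hrc : r < c := by omega
        by_cases h2 : r < c - 1
        · rw [List.getD_append _ _ _ _ (by simp only [List.length_drop, hchlen]; omega)]
          have hd : (ch.drop 1).getD r ' ' = ch.getD (1 + r) ' ' := by
            rw [List.getD_eq_getElem _ _ (by simp only [List.length_drop, hchlen]; omega),
              List.getElem_drop, List.getD_eq_getElem _ _ (by omega)]
          rw [hd, hch, chunk_getD ts (c * k) c (1 + r) (by omega) (by omega)]
          have hmod : (j + 1) % c = r + 1 := by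
            have h' : (c * k + (r + 1)) % c = (r + 1) % c := Nat.mul_add_mod c k _
            have he : c * k + (r + 1) = j + 1 := by omega
            rw [he] at h'
            rw [h', Nat.mod_eq_of_lt (by omega)]
          simp only [srcChar]
          rw [if_neg (by omega)]
          congr 1
          omega
        · have hreq : r = c - 1 := by omega
          rw [List.getD_append_right _ _ _ _ (by simp only [List.length_drop, hchlen]; omega)]
          simp only [List.length_drop, hchlen]
          have : r - (c - 1) = 0 := by omega
          rw [this]
          simp only [List.getD_cons_zero]
          rw [hch, chunk_getD ts (c * k) c 0 (by omega) (by omega)]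
          have hmod : (j + 1) % c = 0 := by
            have : j + 1 = (k + 1) * c := by omega
            rw [this, Nat.mul_mod_left]
          simp only [srcChar]
          rw [if_pos hmod]
          congr 1
          omega

-- A's fold equals the rotated-chunk join plus the untouched tail
theorem A_eq_join (c : Nat) (hc : 1 ≤ c) (ts : List Char) :
    (List.range (ts.length / c)).foldl (fun res (b : Nat) => blockStep (c : Int) res ((c : Int) * (b : Int))) ts
      = ((List.range (ts.length / c)).map (fun b => rotChunk (c : Int) ((ts.drop (c * b)).take c))).flatten
        ++ ts.drop (c * (ts.length / c)) := by
  set q := ts.length / c with hq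
  have hqc : q * c ≤ ts.length := Nat.div_mul_le_self ts.length c
  have hcq : c * q = q * c := Nat.mul_comm c q
  obtain ⟨alen, aget⟩ := outerInv c hc ts q (le_refl q)
  obtain ⟨jlen, jget⟩ := joinChar c hc ts q (le_refl q)
  apply List.ext_getElem
  · rw [alen, List.length_append, jlen, List.length_drop]
    omega
  · intro j h1 h2
    rw [← List.getD_eq_getElem _ ' ' h1, ← List.getD_eq_getElem _ ' ' h2, aget j]
    by_cases h3 : j < q * c
    · rw [if_pos h3, List.getD_append _ _ _ _ (by rw [jlen]; exact h3), jget j h3]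
    · rw [if_neg h3, List.getD_append_right _ _ _ _ (by rw [jlen]; omega), jlen]
      have hjl : j < ts.length := by rw [alen] at h1; exact h1
      have hidx : j - q * c < (ts.drop (c * q)).length := by
        simp only [List.length_drop]; omega
      have key : (ts.drop (c * q)).getD (j - q * c) ' ' = ts.getD (c * q + (j - q * c)) ' ' := by
        rw [List.getD_eq_getElem _ _ hidx, List.getElem_drop, List.getD_eq_getElem _ _ (by omega)]
      rw [key]
      congr 1
      omega

-- ===== VERDICT (by name: the statement is the Claim_ definition above) =====
theorem apply_spec : Claim_equal_apply := by
  intro text params _ hpre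
  unfold Pre_apply at hpre
  simp only [Spec_apply, apply, apply_alt]
  generalize hgen : (List.lookup "cycle" params).getD 3 = c at hpre ⊢
  obtain ⟨cN, rfl⟩ : ∃ cN : Nat, c = (cN : Int) := ⟨c.toNat, by omega⟩
  have hc1 : 1 ≤ cN := by omega
  have hlen : PySem.Str.len text = (text.toList.length : Int) := by rw [PySem.Str.len_eq]
  rw [hlen]
  -- A side
  rw [outerRange text.toList.length cN hc1, List.foldl_map, A_eq_join cN hc1 text.toList]
  -- B side
  rw [chunkRange text.toList.length cN hc1, List.map_map, List.map_map]
  have hco : ((rotChunk (cN : Int) ∘ fun i => PySem.List.slice text.toList (some i) (some (i + (cN : Int))))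
        ∘ fun k : Nat => ((cN * k : Nat) : Int))
      = fun k : Nat => rotChunk (cN : Int) ((text.toList.drop (cN * k)).take cN) := by
    funext k
    simp only [Function.comp]
    rw [PySem.List.slice_natCast_add]
  rw [hco]
  have hdm := Nat.div_add_mod text.toList.length cN
  by_cases hr0 : text.toList.length % cN = 0
  · have hm : (text.toList.length + cN - 1) / cN = text.toList.length / cN := by
      have h1 : text.toList.length + cN - 1 = cN * (text.toList.length / cN) + (cN - 1) := by omega
      rw [h1, Nat.mul_add_div (by omega)]
      simp [Nat.div_eq_of_lt (show cN - 1 < cN by omega)]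
    have hdrop : text.toList.drop (cN * (text.toList.length / cN)) = [] :=
      List.drop_eq_nil_of_le (by omega)
    rw [hm, hdrop, List.append_nil]
  · have hrlt : text.toList.length % cN < cN := Nat.mod_lt _ (by omega)
    have hm : (text.toList.length + cN - 1) / cN = text.toList.length / cN + 1 := by
      have hx : cN * (text.toList.length / cN + 1) = cN * (text.toList.length / cN) + cN := by ring
      have h1 : text.toList.length + cN - 1
          = cN * (text.toList.length / cN + 1) + (text.toList.length % cN - 1) := by omega
      rw [h1, Nat.mul_add_div (by omega),
        Nat.div_eq_of_lt (show text.toList.length % cN - 1 < cN by omega)]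
    rw [hm, List.range_succ, List.map_append, List.flatten_append]
    have hsing : ∀ g : Nat → List Char, (List.map g [text.toList.length / cN]).flatten
        = g (text.toList.length / cN) := by
      intro g
      rw [List.map_cons, List.map_nil, List.flatten_cons, List.flatten_nil, List.append_nil]
    rw [hsing]
    congr 1
    have hchlen : ((text.toList.drop (cN * (text.toList.length / cN))).take cN).length
        = text.toList.length % cN := by
      rw [List.length_take, List.length_drop]; omega
    unfold rotChunk
    have hne : ¬ ((((text.toList.drop (cN * (text.toList.length / cN))).take cN).length : Int) = (cN : Int)) := by
      rw [hchlen]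
      intro hEq
      have h2 : text.toList.length % cN = cN := Nat.cast_inj.mp hEq
      omega
    rw [if_neg hne]
    have htake : List.take cN (List.drop (cN * (text.toList.length / cN)) text.toList)
        = List.drop (cN * (text.toList.length / cN)) text.toList :=
      List.take_of_length_le (by rw [List.length_drop]; omega)
    rw [htake]
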